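-- pv_equiv track=rewrite | github.com/baeksangha/python_sw | 4672_수진이의_팰린드롬/source.py | solution
-- ===== SOURCE A (Python) =====
-- def solution(string):
--     answer = 0
--     dict_ = {}
--     for s in string:
--         if s in dict_:
--             dict_[s] += 1
--         else:
--             dict_[s] = 1
--
--     for _, v in dict_.items():
--         answer += v * (v + 1) // 2
--
--     return answer
-- ===== SOURCE B (Python) =====
-- def solution(string):
--     def go(cs):
--         if not cs:
--             return 0
--         c = cs[0]
--         j = 1
--         while j < len(cs) and cs[j] == c:
--             j += 1
--         return j * (j + 1) // 2 + go(cs[j:])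
--     return go(sorted(string))
-- ===== Notes on version B (the rewrite author's own statement) =====
-- stated objective: alternative
-- what changed: B sorts the characters and recursively consumes runs of equal characters, adding L*(L+1)//2 per run length L, instead of building a frequency dictionary and summing over its values in a second loop.
import Mathlib
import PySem

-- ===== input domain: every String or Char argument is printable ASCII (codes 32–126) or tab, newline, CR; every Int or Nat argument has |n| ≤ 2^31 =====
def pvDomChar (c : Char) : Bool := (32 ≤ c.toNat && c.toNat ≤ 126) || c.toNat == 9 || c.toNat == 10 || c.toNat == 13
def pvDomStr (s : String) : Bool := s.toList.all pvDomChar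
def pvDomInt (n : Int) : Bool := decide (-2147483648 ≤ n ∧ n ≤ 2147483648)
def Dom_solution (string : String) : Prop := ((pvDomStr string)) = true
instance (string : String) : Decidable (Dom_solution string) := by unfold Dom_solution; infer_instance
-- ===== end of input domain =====

-- B replaces A's frequency-dictionary-and-sum with a sort-then-run-length scan: same return value, different algorithm (not faster).


-- ===== PORT A =====
-- A: build a character-frequency dict, then sum v*(v+1)//2 over its values.
def solution (string : String) : Int :=
  let dict := string.toList.foldl
    (fun d s => if d.contains s then d.insert s (d.getD s 0 + 1) else d.insert s 1)
    PySem.Dict.empty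
  dict.items.foldl (fun answer kv => answer + PySem.Int.floordiv (kv.2 * (kv.2 + 1)) 2) 0

-- ===== PORT B =====
-- B's helper go(cs): j counts the leading run of cs[0] (the while loop = takeWhile), adds
-- j*(j+1)//2 and recurses on cs[j:] (= dropWhile of the run).
def solutionAltGo : List Char → Int
  | [] => 0
  | c :: rest =>
      let j : Int := ((rest.takeWhile (fun x => x == c)).length : Int) + 1
      PySem.Int.floordiv (j * (j + 1)) 2 + solutionAltGo (rest.dropWhile (fun x => x == c))
termination_by l => l.length
decreasing_by simpa using Nat.lt_succ_of_le (List.length_dropWhile_le _ _)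

def solution_alt (string : String) : Int :=
  solutionAltGo (PySem.List.sorted string.toList (fun x => x) false)

-- ===== PRECONDITION & SPEC =====
def Spec_solution (string : String) (out : Int) : Prop := out = solution_alt string
instance (string : String) (out : Int) : Decidable (Spec_solution string out) := by unfold Spec_solution; infer_instance

-- ===== CLAIM (what is proved, stated in full; the proofs are below) =====
def Claim_equal_solution : Prop := ∀ (string : String), Dom_solution string → Spec_solution string (solution string)

-- ===== LEMMAS AND PROOFS =====

-- the per-character triangular summand: count(k, t) * (count(k, t) + 1) // 2
def triF (t : List Char) (k : Char) : Int :=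
  PySem.Int.floordiv ((t.count k : Int) * ((t.count k : Int) + 1)) 2

-- A's counting loop is Counter(xs): in the `else` branch the missing key reads getD = 0.
lemma foldA_eq_counter (cs : List Char) :
    cs.foldl (fun d s => if d.contains s then d.insert s (d.getD s 0 + 1) else d.insert s 1)
      PySem.Dict.empty = PySem.Dict.counter cs := by
  have hfun : (fun (d : PySem.Dict Char Int) s =>
      if d.contains s then d.insert s (d.getD s 0 + 1) else d.insert s 1)
      = fun d s => d.insert s (d.getD s 0 + 1) := by
    funext d s
    by_cases h : d.contains s
    · simp [h]
    · simp only [Bool.not_eq_true] at h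
      simp [h, PySem.Dict.getD_of_not_contains _ _ h]
  rw [hfun, PySem.Dict.foldl_insert_getD_add_one_eq_counter]

-- A's value, as a Finset sum over the distinct characters.
lemma solution_eq_finsetSum (string : String) :
    solution string = ∑ k ∈ string.toList.toFinset, triF string.toList k := by
  show (string.toList.foldl _ PySem.Dict.empty).items.foldl _ 0 = _
  rw [foldA_eq_counter, PySem.Dict.items_counter]
  simp only [PySem.List.foldl_add, List.map_map, zero_add]
  have hmem : (PySem.Set.ofList string.toList).toFinset = string.toList.toFinset := by
    ext x; simp [PySem.Set.mem_ofList]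
  rw [← hmem, List.sum_toFinset _ (PySem.Set.nodup_ofList string.toList)]
  rfl

-- elements surviving the dropWhile of a run of c, in a sorted list bounded below by c, differ from c
lemma dropWhile_run_ne (c : Char) : ∀ (l : List Char), l.Pairwise (· ≤ ·) → (∀ x ∈ l, c ≤ x) →
    ∀ y ∈ l.dropWhile (fun x => x == c), y ≠ c := by
  intro l
  induction l with
  | nil => simp
  | cons a as ih =>
    intro hp hge y hy
    by_cases h : (a == c) = true
    · rw [List.dropWhile_cons, if_pos h] at hy
      exact ih hp.of_cons (fun x hx => hge x (List.mem_cons_of_mem _ hx)) y hy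
    · rw [List.dropWhile_cons, if_neg h] at hy
      have ha : c < a :=
        lt_of_le_of_ne (hge a List.mem_cons_self) (fun hca => h (by simp [hca.symm]))
      rcases List.mem_cons.mp hy with rfl | hmem
      · exact fun hc => h (by simp [hc])
      · exact ne_of_gt (lt_of_lt_of_le ha (List.rel_of_pairwise_cons hp hmem))

-- B's run-length scan on a sorted list, as the same Finset sum.
lemma goB_eq_finsetSum : ∀ (n : Nat) (t : List Char), t.length ≤ n →
    t.Pairwise (· ≤ ·) → solutionAltGo t = ∑ k ∈ t.toFinset, triF t k := by
  intro n
  induction n with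
  | zero =>
    intro t ht _
    have : t = [] := List.eq_nil_of_length_eq_zero (Nat.le_zero.mp ht)
    subst this
    simp [solutionAltGo]
  | succ n ih =>
    intro t ht hp
    match t with
    | [] => simp [solutionAltGo]
    | c :: rest =>
      have hc_le : ∀ x ∈ rest, c ≤ x := fun x hx => List.rel_of_pairwise_cons hp hx
      have hsplit : rest.takeWhile (fun x => x == c) ++ rest.dropWhile (fun x => x == c) = rest :=
        List.takeWhile_append_dropWhile
      have hrun : ∀ x ∈ rest.takeWhile (fun x => x == c), x = c := by
        intro x hx
        have := List.mem_takeWhile_imp hx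
        exact eq_of_beq this
      have hrest' : ∀ y ∈ rest.dropWhile (fun x => x == c), y ≠ c :=
        dropWhile_run_ne c rest hp.of_cons hc_le
      have hcnt_run : (rest.takeWhile (fun x => x == c)).count c
          = (rest.takeWhile (fun x => x == c)).length :=
        List.count_eq_length.mpr (fun b hb => (hrun b hb).symm)
      have hcnt_rest'_c : (rest.dropWhile (fun x => x == c)).count c = 0 :=
        List.count_eq_zero.mpr (fun hmem => (hrest' c hmem) rfl)
      have hcnt_rest : rest.count c = (rest.takeWhile (fun x => x == c)).length := by
        conv_lhs => rw [← hsplit]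
        rw [List.count_append, hcnt_run, hcnt_rest'_c, Nat.add_zero]
      have hcount_c : (c :: rest).count c = (rest.takeWhile (fun x => x == c)).length + 1 := by
        rw [List.count_cons_self, hcnt_rest]
      have hcount_ne : ∀ k, k ≠ c → (c :: rest).count k
          = (rest.dropWhile (fun x => x == c)).count k := by
        intro k hk
        have h1 : (c :: rest).count k = rest.count k := by
          simp [Ne.symm hk]
        rw [h1]
        conv_lhs => rw [← hsplit]
        rw [List.count_append, List.count_eq_zero.mpr (fun hmem => hk (hrun k hmem)),
          Nat.zero_add]
      have hfin : (c :: rest).toFinset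
          = insert c (rest.dropWhile (fun x => x == c)).toFinset := by
        ext x
        simp only [List.toFinset_cons, Finset.mem_insert, List.mem_toFinset]
        constructor
        · rintro (h | h)
          · exact Or.inl h
          · rw [← hsplit] at h
            rcases List.mem_append.mp h with h | h
            · exact Or.inl (hrun x h)
            · exact Or.inr h
        · rintro (h | h)
          · exact Or.inl h
          · refine Or.inr ?_
            rw [← hsplit]
            exact List.mem_append.mpr (Or.inr h)
      have hnotmem : c ∉ (rest.dropWhile (fun x => x == c)).toFinset := by
        simp only [List.mem_toFinset]
        intro h; exact (hrest' c h) rfl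
      have hlen : (rest.dropWhile (fun x => x == c)).length ≤ n :=
        le_trans (List.length_dropWhile_le _ _) (Nat.lt_succ_iff.mp (by simpa using ht))
      have hpw' : (rest.dropWhile (fun x => x == c)).Pairwise (· ≤ ·) :=
        List.Pairwise.sublist (List.dropWhile_sublist _) hp.of_cons
      have hIH := ih (rest.dropWhile (fun x => x == c)) hlen hpw'
      rw [solutionAltGo, hfin, Finset.sum_insert hnotmem]
      have hsum_congr : ∑ k ∈ (rest.dropWhile (fun x => x == c)).toFinset, triF (c :: rest) k
          = ∑ k ∈ (rest.dropWhile (fun x => x == c)).toFinset,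
              triF (rest.dropWhile (fun x => x == c)) k := by
        apply Finset.sum_congr rfl
        intro k hk
        have hkne : k ≠ c := fun h => hnotmem (h ▸ hk)
        unfold triF
        rw [hcount_ne k hkne]
      rw [hsum_congr, ← hIH]
      congr 1
      unfold triF
      rw [hcount_c]
      push_cast
      ring_nf

lemma solution_alt_eq_finsetSum (string : String) :
    solution_alt string
      = ∑ k ∈ (PySem.List.sorted string.toList (fun x => x) false).toFinset,
          triF (PySem.List.sorted string.toList (fun x => x) false) k := by
  exact goB_eq_finsetSum (PySem.List.sorted string.toList (fun x => x) false).length _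
    le_rfl (PySem.List.sorted_pairwise string.toList (fun x => x))

-- ===== VERDICT (by name: the statement is the Claim_ definition above) =====
theorem solution_spec : Claim_equal_solution := by
  intro string _
  unfold Spec_solution
  have hperm : (PySem.List.sorted string.toList (fun x => x) false).Perm string.toList :=
    PySem.List.sorted_perm string.toList (fun x => x) false
  rw [solution_eq_finsetSum, solution_alt_eq_finsetSum]
  have hfin : (PySem.List.sorted string.toList (fun x => x) false).toFinset
      = string.toList.toFinset := by
    ext x; simp [List.mem_toFinset, hperm.mem_iff]
  have htri : ∀ k, triF (PySem.List.sorted string.toList (fun x => x) false) k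
      = triF string.toList k := by
    intro k; unfold triF; rw [hperm.count_eq]
  rw [hfin]
  exact Finset.sum_congr rfl (fun k _ => (htri k).symm)
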